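-- pv_equiv track=rewrite | github.com/TheBeardBeatsAll/Automate | chpt4/commaCode.py | comma
-- ===== SOURCE A (Python) =====
-- def comma(list):
--     strList = ''
--     # Turn list into a string of form x, y, z, and a
--     for i in range(0, len(list)):
--         if i == len(list) - 1: # if last element add element to string
--             strList += list[i]
--         elif i == len(list) - 2: # if 2nd last element add element + ' and '
--             strList += list[i] + ' and '
--         else: # o/w add element & comma
--             strList += list[i] + ', '
--     return strList
-- ===== SOURCE B (Python) =====
-- def comma(list):
--     if not list:
--         return ''
--     if len(list) == 1:
--         return '' + list[0]
--     return ', '.join(list[:-1]) + ' and ' + list[-1]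
-- ===== Notes on version B (the rewrite author's own statement) =====
-- stated objective: simpler
-- what changed: Replaces the indexed loop with positional branching (compare i to len-1/len-2 on every step) and repeated string += by guards for the empty/singleton cases plus a slice-based ', '.join of all but the last element and one ' and ' concatenation.
import Mathlib
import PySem

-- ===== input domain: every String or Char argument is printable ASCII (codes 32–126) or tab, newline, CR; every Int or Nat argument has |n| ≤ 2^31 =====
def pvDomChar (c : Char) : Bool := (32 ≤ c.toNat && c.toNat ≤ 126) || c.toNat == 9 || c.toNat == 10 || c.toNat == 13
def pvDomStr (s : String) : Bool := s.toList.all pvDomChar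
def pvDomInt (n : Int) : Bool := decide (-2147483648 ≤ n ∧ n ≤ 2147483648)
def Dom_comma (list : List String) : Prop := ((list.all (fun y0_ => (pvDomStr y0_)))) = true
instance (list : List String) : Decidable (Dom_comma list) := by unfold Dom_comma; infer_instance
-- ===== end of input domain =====

-- B replaces A's per-index positional branching inside the loop by empty/singleton guards
-- plus ', '.join over list[:-1] and one final ' and ' concatenation (objective: simpler).

-- ===== PORT A =====
-- literal port of A's indexed loop; list[i] is always in range here, so pyGetD is exact
def comma (list : List String) : String :=
  (PySem.List.pyRange 0 (list.length : Int)).foldl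
    (fun strList i =>
      if i = (list.length : Int) - 1 then
        strList ++ PySem.List.pyGetD list i ""
      else if i = (list.length : Int) - 2 then
        strList ++ (PySem.List.pyGetD list i "" ++ " and ")
      else
        strList ++ (PySem.List.pyGetD list i "" ++ ", "))
    ""

-- ===== PORT B =====
-- literal port of Source B; both indexings are guarded in range, so pyGetD is exact
def comma_alt (list : List String) : String :=
  if list.length = 0 then ""
  else if list.length = 1 then "" ++ PySem.List.pyGetD list 0 ""
  else
    PySem.Str.join ", " (PySem.List.slice list none (some (-1)))
      ++ " and " ++ PySem.List.pyGetD list (-1) ""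

-- ===== PRECONDITION & SPEC =====
def Spec_comma (list : List String) (out : String) : Prop := out = comma_alt list
instance (list : List String) (out : String) : Decidable (Spec_comma list out) := by unfold Spec_comma; infer_instance

-- ===== CLAIM (what is proved, stated in full; the proofs are below) =====
def Claim_equal_comma : Prop := ∀ (list : List String), Dom_comma list → Spec_comma list (comma list)

-- ===== LEMMAS AND PROOFS =====

-- every list of length ≥ 2 splits off its last two elements
theorem pv_two_last (l : List String) (h : 2 ≤ l.length) :
    ∃ ys p q, l = ys ++ [p, q] := by
  rcases l.eq_nil_or_concat with rfl | ⟨l₁, q, rfl⟩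
  · simp at h
  · rcases l₁.eq_nil_or_concat with rfl | ⟨ys, p, rfl⟩
    · simp at h
    · exact ⟨ys, p, q, by simp⟩

-- A's loop over the first m indices (with m + 2 ≤ L) always takes the third branch
theorem pv_foldl_prefix (xs : List String) (L : Int) (m : Nat)
    (hm : (m : Int) + 2 ≤ L) (hx : m ≤ xs.length) (acc : String) :
    (PySem.List.pyRange 0 (m : Int)).foldl
      (fun strList i =>
        if i = L - 1 then
          strList ++ PySem.List.pyGetD xs i ""
        else if i = L - 2 then
          strList ++ (PySem.List.pyGetD xs i "" ++ " and ")
        else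
          strList ++ (PySem.List.pyGetD xs i "" ++ ", ")) acc
    = (xs.take m).foldl (fun s x => s ++ (x ++ ", ")) acc := by
  induction m generalizing acc with
  | zero => simp [PySem.List.pyRange]
  | succ m ih =>
    have hmlt : m < xs.length := by omega
    rw [show ((m + 1 : Nat) : Int) = (m : Int) + 1 from by push_cast; ring,
      PySem.List.pyRange_one_succ_right (Int.natCast_nonneg m), List.foldl_append,
      ih (by omega) (by omega) acc]
    simp only [List.foldl_cons, List.foldl_nil]
    rw [if_neg (by omega), if_neg (by omega), PySem.List.pyGetD_natCast]
    rw [List.take_add_one, List.getElem?_eq_getElem hmlt, List.foldl_append]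
    simp [List.getD, List.getElem?_eq_getElem hmlt]

-- characterisation of A on lists of length ≥ 2
theorem pv_comma_eq (ys : List String) (p q : String) :
    comma (ys ++ [p, q])
      = (ys.foldl (fun s x => s ++ (x ++ ", ")) "") ++ (p ++ " and ") ++ q := by
  unfold comma
  have hlen : (ys ++ [p, q]).length = ys.length + 2 := by simp
  rw [hlen, show ((ys.length + 2 : Nat) : Int) = (ys.length : Int) + 1 + 1 from by push_cast; ring]
  rw [PySem.List.pyRange_one_succ_right (by positivity),
    PySem.List.pyRange_one_succ_right (Int.natCast_nonneg ys.length),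
    List.foldl_append, List.foldl_append,
    pv_foldl_prefix (ys ++ [p, q]) _ ys.length (by omega) (by simp)]
  rw [List.take_left]
  simp only [List.foldl_cons, List.foldl_nil]
  split_ifs <;> try omega
  rw [PySem.List.pyGetD_natCast,
    show ((ys.length : Int)) + 1 = ((ys.length + 1 : Nat) : Int) from by push_cast; ring,
    PySem.List.pyGetD_natCast]
  have hp : (ys ++ [p, q]).getD ys.length "" = p := by
    simp [List.getD]
  have hq : (ys ++ [p, q]).getD (ys.length + 1) "" = q := by
    simp [List.getD]
  rw [hp, hq]

-- sep.join (ls ++ [p]) appends each element of ls followed by sep, then p  (char level)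
theorem pv_join_char (sep : List Char) (ls : List (List Char)) (p : List Char) :
    PySem.Chars.join sep (ls ++ [p])
      = (ls.map (fun l => l ++ sep)).flatten ++ p := by
  induction ls with
  | nil => simp [PySem.Chars.join_singleton]
  | cons a ls ih =>
    obtain ⟨b, rest, he⟩ : ∃ b rest, ls ++ [p] = b :: rest := by
      cases ls <;> exact ⟨_, _, rfl⟩
    rw [List.cons_append, he, PySem.Chars.join_cons_cons, ← he, ih]
    simp

-- the char content of A's accumulator loop
theorem pv_foldl_toList (ys : List String) (acc : String) :
    (ys.foldl (fun s x => s ++ (x ++ ", ")) acc).toList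
      = acc.toList ++ (ys.map (fun x => x.toList ++ ", ".toList)).flatten := by
  induction ys generalizing acc with
  | nil => simp
  | cons a ys ih => simp [ih]

-- characterisation of B on lists of length ≥ 2
theorem pv_comma_alt_eq (ys : List String) (p q : String) :
    comma_alt (ys ++ [p, q])
      = (ys.foldl (fun s x => s ++ (x ++ ", ")) "") ++ (p ++ " and ") ++ q := by
  unfold comma_alt
  have hlen : (ys ++ [p, q]).length = ys.length + 2 := by simp
  rw [hlen, if_neg (by omega), if_neg (by omega), PySem.List.slice_to_neg_one]
  have hdrop : (ys ++ [p, q]).dropLast = ys ++ [p] := by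
    rw [show ys ++ [p, q] = (ys ++ [p]) ++ [q] from by simp, List.dropLast_concat]
  have hlast : PySem.List.pyGetD (ys ++ [p, q]) (-1) "" = q := by
    rw [show ys ++ [p, q] = (ys ++ [p]) ++ [q] from by simp,
      PySem.List.pyGetD_neg_one_append_singleton]
  rw [hdrop, hlast, ← String.toList_inj]
  simp [PySem.Str.toList_join, pv_join_char, pv_foldl_toList, Function.comp_def]

-- ===== VERDICT (by name: the statement is the Claim_ definition above) =====
theorem comma_spec : Claim_equal_comma := by
  intro list _
  unfold Spec_comma
  match list with
  | [] => rfl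
  | [a] =>
    simp [comma, comma_alt, PySem.List.pyRange, PySem.List.pyGetD, PySem.List.pyGet?,
      PySem.List.pyIdx?]
  | a :: b :: t =>
    obtain ⟨ys, p, q, he⟩ := pv_two_last (a :: b :: t) (by simp)
    rw [he, pv_comma_eq, pv_comma_alt_eq]
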